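-- pv_equiv track=rewrite | github.com/pgarrett-scripps/peptacular | src/peptacular/sequence.py | create_modified_sequence
-- ===== SOURCE A (Python) =====
-- from typing import Dict, List, Any, Tuple, Union
--
-- def create_modified_sequence(sequence: str, modifications: Dict[int, Any]) -> str:
--     """
--     Creates a modified amino acid sequence from an unmodified amino acid sequence and a dictionary of modifications.
--
--     The modifications are specified as a dictionary where the keys are the indices of the modified amino acids
--     in the peptide sequence, and the values are the modifications to apply at those indices. The modifications are
--     added to the peptide sequence in descending order of index, so that the indices remain valid after each
--     modification is applied.
--     """
--
--     modified_sequence = []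
--     prev_index = 0
--
--     # Sort the modifications by index in descending order
--     for i, mod in sorted(modifications.items()):
--
--         if i < -1 or i >= len(sequence):
--             raise ValueError(f'Index of modification: {i} is invalid for peptide sequence: {sequence}')
--
--         # Insert the modification into the modified peptide sequence
--         modified_sequence.append(sequence[prev_index: i + 1])
--         modified_sequence.append(f"({mod})")
--         prev_index = i + 1
--
--     modified_sequence.append(sequence[prev_index:])
--     return ''.join(modified_sequence)
-- ===== SOURCE B (Python) =====
-- def create_modified_sequence(sequence, modifications):
--     n = len(sequence)
--     # validate first, in ascending key order, so the error message names the smallest bad index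
--     for i in sorted(modifications):
--         if i < -1 or i >= n:
--             raise ValueError(f'Index of modification: {i} is invalid for peptide sequence: {sequence}')
--     parts = []
--     if -1 in modifications:
--         parts.append(f"({modifications[-1]})")
--     for idx, ch in enumerate(sequence):
--         parts.append(ch)
--         if idx in modifications:
--             parts.append(f"({modifications[idx]})")
--     return ''.join(parts)
-- ===== Notes on version B (the rewrite author's own statement) =====
-- stated objective: alternative
-- what changed: Replaces A's sort-the-items-then-concatenate-slices construction by a single character-by-character forward pass that looks each position up in the modifications dict (plus a -1 prefix), keeping the same up-front ascending-order validation and identical ValueError messages; Pre_ excludes out-of-range indices (both raise ValueError) and association lists with duplicate keys, which do not represent a Python dict.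
import Mathlib
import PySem

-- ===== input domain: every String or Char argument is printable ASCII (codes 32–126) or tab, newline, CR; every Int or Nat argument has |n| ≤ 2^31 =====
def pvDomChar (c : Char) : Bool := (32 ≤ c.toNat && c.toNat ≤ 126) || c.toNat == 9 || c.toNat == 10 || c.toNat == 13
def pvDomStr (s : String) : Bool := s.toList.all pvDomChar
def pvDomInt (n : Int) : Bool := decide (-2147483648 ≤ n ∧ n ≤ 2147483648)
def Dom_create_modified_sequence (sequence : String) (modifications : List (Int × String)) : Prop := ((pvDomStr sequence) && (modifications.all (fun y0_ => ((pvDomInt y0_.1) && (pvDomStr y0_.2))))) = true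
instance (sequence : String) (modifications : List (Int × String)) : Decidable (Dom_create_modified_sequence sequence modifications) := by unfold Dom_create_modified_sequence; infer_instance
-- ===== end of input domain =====

-- B replaces A's sort-then-slice concatenation by a single character-by-character scan with dict
-- lookups (objective: alternative decomposition; same behaviour, including the ValueError cases).

-- f"({mod})" as a char list (used by both ports)
def pvParen (m : String) : List Char := '(' :: m.toList ++ [')']

-- first-match lookup in the association list (= lookup in the Python dict the list represents)
def pvLookup (modifications : List (Int × String)) (i : Int) : Option String :=
  (PySem.Dict.mk modifications).get? i

-- ===== PORT A =====
-- The in-loop `raise ValueError` fires exactly when some key is < -1 or ≥ len(sequence); those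
-- inputs are excluded by Pre_ below, so the port is the raise-free path of A.
def create_modified_sequence (sequence : String) (modifications : List (Int × String)) : String :=
  let cs := sequence.toList
  let st := (PySem.List.sorted modifications (fun p => p.1) false).foldl
      (fun (st : List Char × Int) p =>
        (st.1 ++ PySem.List.slice cs (some st.2) (some (p.1 + 1)) ++ pvParen p.2, p.1 + 1))
      ([], 0)
  String.ofList (st.1 ++ PySem.List.slice cs (some st.2) none)

-- ===== PORT B =====
-- Source B's validation loop raises exactly outside Pre_ (same condition as A); inside Pre_ it is a
-- no-op, so the port is the constructive part: the -1 prefix, then one pass over the characters.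
def create_modified_sequence_alt (sequence : String) (modifications : List (Int × String)) : String :=
  let cs := sequence.toList
  let pre : List Char :=
    match pvLookup modifications (-1) with
    | some m => pvParen m
    | none => []
  let body := (PySem.List.enumerate cs 0).foldl
      (fun acc p =>
        acc ++ p.2 :: (match pvLookup modifications p.1 with
                       | some m => pvParen m
                       | none => [])) []
  String.ofList (pre ++ body)

-- ===== PRECONDITION & SPEC =====
-- Pre_ excludes (a) keys < -1 or ≥ len(sequence), on which A (and B) raise ValueError, and
-- (b) lists with duplicate keys, which do not represent a Python dict (A's parameter type).
def Pre_create_modified_sequence (sequence : String) (modifications : List (Int × String)) : Prop :=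
  (modifications.map Prod.fst).Nodup ∧
  ∀ p ∈ modifications, -1 ≤ p.1 ∧ p.1 < PySem.Str.len sequence

instance (sequence : String) (modifications : List (Int × String)) : Decidable (Pre_create_modified_sequence sequence modifications) := by
  unfold Pre_create_modified_sequence; infer_instance

def pvWitness_create_modified_sequence : String × (List (Int × String)) :=
  ("PEPTIDE", [((-1 : Int), "ac"), ((2 : Int), "ox")])

def Spec_create_modified_sequence (sequence : String) (modifications : List (Int × String)) (out : String) : Prop := out = create_modified_sequence_alt sequence modifications
instance (sequence : String) (modifications : List (Int × String)) (out : String) : Decidable (Spec_create_modified_sequence sequence modifications out) := by unfold Spec_create_modified_sequence; infer_instance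

-- ===== CLAIM (what is proved, stated in full; the proofs are below) =====
def Claim_equal_create_modified_sequence : Prop := ∀ (sequence : String) (modifications : List (Int × String)), Dom_create_modified_sequence sequence modifications → Pre_create_modified_sequence sequence modifications → Spec_create_modified_sequence sequence modifications (create_modified_sequence sequence modifications)

-- ===== LEMMAS AND PROOFS =====\n
-- A's loop, recursively: the remaining slices-and-mods from position `prev` on
def pvGo (cs : List Char) (prev : Int) : List (Int × String) → List Char
  | [] => PySem.List.slice cs (some prev) none
  | (i, m) :: t => PySem.List.slice cs (some prev) (some (i + 1)) ++ pvParen m ++ pvGo cs (i + 1) t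

-- B's loop, recursively: characters from index `j` on, each followed by its mod if any
def pvScan (f : Int → Option String) (j : Int) : List Char → List Char
  | [] => []
  | c :: t => c :: ((match f j with | some m => pvParen m | none => []) ++ pvScan f (j + 1) t)

theorem pvFoldA (cs : List Char) (L : List (Int × String)) :
    ∀ (acc : List Char) (prev : Int),
      (L.foldl (fun (st : List Char × Int) p =>
        (st.1 ++ PySem.List.slice cs (some st.2) (some (p.1 + 1)) ++ pvParen p.2, p.1 + 1)) (acc, prev)).1
        ++ PySem.List.slice cs (some ((L.foldl (fun (st : List Char × Int) p =>
        (st.1 ++ PySem.List.slice cs (some st.2) (some (p.1 + 1)) ++ pvParen p.2, p.1 + 1)) (acc, prev)).2)) none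
      = acc ++ pvGo cs prev L := by
  induction L with
  | nil => intro acc prev; simp [pvGo]
  | cons p t ih =>
      intro acc prev
      obtain ⟨i, m⟩ := p
      simp only [List.foldl_cons, pvGo]
      rw [ih]
      simp

theorem pvFoldB (f : Int → Option String) (cs : List Char) :
    ∀ (acc : List Char) (j : Int),
      (PySem.List.enumerate cs j).foldl
        (fun acc p => acc ++ p.2 :: (match f p.1 with | some m => pvParen m | none => [])) acc
      = acc ++ pvScan f j cs := by
  induction cs with
  | nil => intro acc j; simp [PySem.List.enumerate_nil, pvScan]
  | cons c t ih =>
      intro acc j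
      rw [PySem.List.enumerate_cons, List.foldl_cons, ih, pvScan]
      simp

theorem pvScan_none (f : Int → Option String) :
    ∀ (l : List Char) (j : Int), (∀ idx : Int, j ≤ idx → f idx = none) → pvScan f j l = l := by
  intro l
  induction l with
  | nil => intro j _; rfl
  | cons c t ih =>
      intro j h
      rw [pvScan, h j le_rfl, ih (j + 1) (fun idx hidx => h idx (by omega))]
      simp

theorem pvScan_segment (f : Int → Option String) (cs : List Char) :
    ∀ (n j : Nat), (∀ idx : Int, (j : Int) ≤ idx → idx < (j : Int) + n → f idx = none) →
      pvScan f j (cs.drop j) = (cs.drop j).take n ++ pvScan f (j + n : Nat) (cs.drop (j + n)) := by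
  intro n
  induction n with
  | zero => intro j _; simp
  | succ n ih =>
      intro j h
      by_cases hj : j < cs.length
      · rw [List.drop_eq_getElem_cons hj, pvScan, h j le_rfl (by omega),
          show ((j : Int) + 1) = ((j + 1 : Nat) : Int) by push_cast; ring,
          ih (j + 1) (fun idx h1 h2 => h idx (by omega) (by push_cast at h2 ⊢; omega))]
        simp only [List.nil_append, List.take_succ_cons]
        rw [show j + (n + 1) = (j + 1) + n by omega]
        simp
      · have h1 : cs.drop j = [] := List.drop_eq_nil_of_le (by omega)
        have h2 : cs.drop (j + (n + 1)) = [] := List.drop_eq_nil_of_le (by omega)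
        rw [h1, h2]; simp [pvScan]

theorem pvMain (f : Int → Option String) (cs : List Char) :
    ∀ (L : List (Int × String)) (j : Nat),
      L.Pairwise (fun a b => a.1 < b.1) →
      (∀ p ∈ L, (j : Int) ≤ p.1 ∧ p.1 < (cs.length : Int)) →
      (∀ p ∈ L, f p.1 = some p.2) →
      (∀ idx : Int, (j : Int) ≤ idx → (∀ p ∈ L, p.1 ≠ idx) → f idx = none) →
      pvGo cs (j : Int) L = pvScan f j (cs.drop j) := by
  intro L
  induction L with
  | nil =>
      intro j _ _ _ hf0
      rw [pvGo, PySem.List.slice_from_natCast,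
        pvScan_none f _ j (fun idx hidx => hf0 idx hidx (by simp))]
  | cons p t ih =>
      intro j hs hb hf1 hf0
      obtain ⟨i, m⟩ := p
      have hji : (j : Int) ≤ i := (hb (i, m) (by simp)).1
      have hin : i < (cs.length : Int) := (hb (i, m) (by simp)).2
      set k : Nat := i.toNat with hk
      have hik : i = (k : Nat) := by omega
      have hjk : j ≤ k := by omega
      have hkn : k < cs.length := by omega
      have hsk : ∀ q ∈ t, i < q.1 := by
        intro q hq; exact (List.pairwise_cons.mp hs).1 q hq
      -- left side
      rw [pvGo, hik, show ((k : Int) + 1) = ((k + 1 : Nat) : Int) by push_cast; ring,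
        PySem.List.slice_natCast]
      -- right side: split the scan at k, then consume the char at k with its mod
      rw [pvScan_segment f cs (k - j) j
        (fun idx h1 h2 => hf0 idx h1 (by
          intro q hq
          rcases List.mem_cons.mp hq with h | h
          · rw [h]; omega
          · have := hsk q h; have := (hb q (by simp [h])).2; omega)),
        show j + (k - j) = k by omega]
      rw [List.drop_eq_getElem_cons hkn, pvScan]
      have hfk : f (k : Int) = some m := by rw [← hik]; exact hf1 (i, m) (by simp)
      rw [hfk]
      rw [show ((k : Int) + 1) = ((k + 1 : Nat) : Int) by push_cast; ring,
        ih (k + 1) (List.pairwise_cons.mp hs).2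
          (fun q hq => ⟨by have := hsk q hq; push_cast; omega, (hb q (by simp [hq])).2⟩)
          (fun q hq => hf1 q (by simp [hq]))
          (fun idx hidx hq => hf0 idx (by push_cast at hidx; omega) (by
            intro q hqq
            rcases List.mem_cons.mp hqq with h | h
            · rw [h]; push_cast at hidx; simp; omega
            · exact hq q h))]
      rw [show (cs.drop j).take (k + 1 - j) = (cs.drop j).take (k - j) ++ [cs[k]] by
        rw [show k + 1 - j = (k - j) + 1 by omega, List.take_add_one,
          List.getElem?_drop, show j + (k - j) = k by omega, List.getElem?_eq_getElem hkn]
        rfl]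
      simp

theorem pvLookup_mem {mods : List (Int × String)} (hnd : (mods.map Prod.fst).Nodup)
    {p : Int × String} (hp : p ∈ mods) : pvLookup mods p.1 = some p.2 := by
  obtain ⟨k, v⟩ := p
  exact PySem.Dict.get?_of_mem_items (PySem.Dict.mk mods) hp (by simpa [PySem.Dict.keys] using hnd)

theorem pvLookup_none {mods : List (Int × String)} {idx : Int}
    (h : ∀ p ∈ mods, p.1 ≠ idx) : pvLookup mods idx = none := by
  rw [pvLookup, PySem.Dict.get?_eq_none_iff_not_mem_keys]
  simp only [PySem.Dict.keys]
  intro hmem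
  obtain ⟨p, hp, hfst⟩ := List.mem_map.mp hmem
  exact h p hp hfst

theorem create_modified_sequence_spec : Claim_equal_create_modified_sequence := by
  intro seq mods _ hpre
  obtain ⟨hnd, hbd⟩ := hpre
  unfold Spec_create_modified_sequence create_modified_sequence create_modified_sequence_alt
  simp only [PySem.Str.len_eq] at hbd
  set cs := seq.toList with hcs
  set L := PySem.List.sorted mods (fun p => p.1) false with hLdef
  have hperm : L.Perm mods := PySem.List.sorted_perm mods (fun p => p.1) false
  have hndL : (L.map Prod.fst).Nodup := ((hperm.map Prod.fst).nodup_iff).mpr hnd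
  have hsle : L.Pairwise (fun a b => a.1 ≤ b.1) := PySem.List.sorted_pairwise mods (fun p => p.1)
  have hne : L.Pairwise (fun a b => a.1 ≠ b.1) := List.pairwise_map.mp hndL
  have hstrict : L.Pairwise (fun a b => a.1 < b.1) :=
    (hsle.and hne).imp (fun h => lt_of_le_of_ne h.1 h.2)
  have hbL : ∀ p ∈ L, -1 ≤ p.1 ∧ p.1 < (cs.length : Int) := fun p hp => hbd p (hperm.mem_iff.mp hp)
  have hf1 : ∀ p ∈ L, pvLookup mods p.1 = some p.2 :=
    fun p hp => pvLookup_mem hnd (hperm.mem_iff.mp hp)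
  have hf0 : ∀ idx : Int, (∀ p ∈ L, p.1 ≠ idx) → pvLookup mods idx = none :=
    fun idx h => pvLookup_none (fun p hp => h p (hperm.mem_iff.mpr hp))
  dsimp only
  rw [pvFoldA cs L [] 0, pvFoldB (pvLookup mods) cs [] 0, List.nil_append, List.nil_append]
  by_cases hneg : ∀ p ∈ L, 0 ≤ p.1
  · have hpre0 : pvLookup mods (-1) = none :=
      hf0 (-1) (fun p hp => by have := hneg p hp; omega)
    have hmain : pvGo cs ((0 : Nat) : Int) L = pvScan (pvLookup mods) 0 (cs.drop 0) :=
      pvMain (pvLookup mods) cs L 0 hstrict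
        (fun p hp => ⟨by simpa using hneg p hp, (hbL p hp).2⟩)
        hf1
        (fun idx _ h => hf0 idx h)
    rw [hpre0]
    simp only [Nat.cast_zero, List.drop_zero] at hmain
    rw [hmain]
    simp
  · push Not at hneg
    obtain ⟨p0, hp0, hp0neg⟩ := hneg
    -- the key -1 can only be the head of the sorted list
    obtain ⟨i, m, t, hLeq⟩ : ∃ i m t, L = (i, m) :: t := by
      rcases hL : L with _ | ⟨⟨i, m⟩, t⟩
      · rw [hL] at hp0; simp at hp0
      · exact ⟨i, m, t, rfl⟩
    have hi : i = -1 := by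
      rw [hLeq] at hp0 hbL hstrict
      rcases List.mem_cons.mp hp0 with h | h
      · have := (hbL p0 hp0).1
        have : p0.1 = -1 := by omega
        rw [h] at this; simpa using this
      · have h1 := (List.pairwise_cons.mp hstrict).1 p0 h
        have h2 := (hbL (i, m) (by simp)).1
        have := (hbL p0 hp0).1
        simp at h1 h2 ⊢; omega
    rw [hLeq, hi] at hf1 hf0 hstrict hbL ⊢
    have hprem : pvLookup mods (-1) = some m := by
      have := hf1 (-1, m) (by simp); simpa using this
    have hmain : pvGo cs ((0 : Nat) : Int) t = pvScan (pvLookup mods) 0 (cs.drop 0) :=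
      pvMain (pvLookup mods) cs t 0 (List.pairwise_cons.mp hstrict).2
        (fun q hq => ⟨by
            have := (List.pairwise_cons.mp hstrict).1 q hq
            simp only [Nat.cast_zero]; omega,
          (hbL q (by simp [hq])).2⟩)
        (fun q hq => hf1 q (by simp [hq]))
        (fun idx hidx h => hf0 idx (by
          intro q hq
          rcases List.mem_cons.mp hq with hh | hh
          · rw [hh]; simp only [Nat.cast_zero] at hidx; simp; omega
          · exact h q hh))
    simp only [Nat.cast_zero, List.drop_zero] at hmain
    rw [pvGo, hprem, show (-1 : Int) + 1 = 0 by ring, hmain]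
    rw [show PySem.List.slice cs (some 0) (some 0) = ((cs.drop 0).take (0 - 0) : List Char) from
      PySem.List.slice_natCast (a := 0) (b := 0) (xs := cs)]
    simp
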